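-- pv_equiv track=rewrite | github.com/FantasyVR/aoc | day24/day24.py | day24P1
-- ===== SOURCE A (Python) =====
-- oddr_directions = [[[+1, 0], [0, -1], [-1, -1], [-1, 0], [-1, +1], [0, +1]],
--                    [[+1, 0], [+1, -1], [0, -1], [-1, 0], [0, +1], [+1, +1]]]
--
-- directions = {'e': 0, 'ne': 1, 'nw': 2, 'w': 3, 'sw': 4, 'se': 5}
--
-- class OffsetCoord(object):
--     def __init__(self, col, row):
--         self.col = col
--         self.row = row
--
-- def oddr_offset_neighbor(hex, direction):
--     parity = hex.row & 1
--     dir = oddr_directions[parity][directions[direction]]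
--     return OffsetCoord(hex.col + dir[0], hex.row + dir[1])
--
-- def getCoordinates(steps, referenceTile):
--     startCoord = referenceTile
--     for step in steps:
--         startCoord = oddr_offset_neighbor(startCoord, step)
--     return startCoord
--
-- def day24P1(stepList):
--     tiles = dict()
--     referenceTile = OffsetCoord(0, 0)
--     for steps in stepList:
--         coord = getCoordinates(steps, referenceTile)
--         pos = tuple([coord.col, coord.row])
--         if pos in tiles:
--             tiles[pos] = not tiles[pos]
--         else:
--             tiles[pos] = True  # True: Black, False: White
--     sumBlack = 0
--     for tile in tiles:
--         if tiles[tile]: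
--             sumBlack += 1
--     return sumBlack
-- ===== SOURCE B (Python) =====
-- # Declarative re-implementation: no step-by-step walk, no toggle dict.
-- # A path's endpoint in axial hex coordinates is the linear combination of its
-- # per-direction step COUNTS with fixed vectors (step order is irrelevant);
-- # a tile is black iff its endpoint occurs an odd number of times, so the answer
-- # is the sum of multiplicity parities over the distinct endpoints.
-- AXIAL = {'e': (1, 0), 'ne': (1, -1), 'nw': (0, -1),
--          'w': (-1, 0), 'sw': (-1, 1), 'se': (0, 1)}
--
-- def day24P1(stepList):
--     endpoints = []
--     for steps in stepList:
--         q = r = 0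
--         for d in set(steps):
--             c, (dq, dr) = steps.count(d), AXIAL[d]
--             q += c * dq
--             r += c * dr
--         endpoints.append((q, r))
--     return sum(endpoints.count(p) % 2 for p in set(endpoints))
-- ===== Notes on version B (the rewrite author's own statement) =====
-- stated objective: alternative
-- what changed: Replaces the stateful step-by-step walk with a row-parity table and a boolean-toggle dict by a declarative computation: each endpoint is a fixed linear combination of per-direction step counts in axial coordinates (order-free), and the answer is the sum of multiplicity parities of the distinct endpoints (no dict, no toggling).
import Mathlib
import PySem

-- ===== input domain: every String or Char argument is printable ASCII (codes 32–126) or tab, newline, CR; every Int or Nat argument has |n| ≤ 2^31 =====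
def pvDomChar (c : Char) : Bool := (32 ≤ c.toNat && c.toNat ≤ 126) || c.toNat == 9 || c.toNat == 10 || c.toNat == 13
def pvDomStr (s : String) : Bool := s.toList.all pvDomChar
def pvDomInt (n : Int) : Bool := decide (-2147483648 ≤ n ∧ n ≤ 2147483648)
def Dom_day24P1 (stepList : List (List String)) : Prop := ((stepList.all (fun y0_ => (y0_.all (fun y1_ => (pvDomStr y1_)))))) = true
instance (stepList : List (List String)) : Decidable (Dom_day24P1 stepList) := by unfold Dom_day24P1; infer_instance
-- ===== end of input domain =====

-- B replaces the stateful walk + toggle dict by a declarative computation: each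
-- endpoint is a linear combination of per-direction step counts in axial
-- coordinates, and the result is the sum of multiplicity parities of the
-- distinct endpoints (no dict, no toggling); alternative, not claimed faster.

-- ===== PORT A =====
def pvOddrDirections : List (List (Int × Int)) :=
  [[(1, 0), (0, -1), (-1, -1), (-1, 0), (-1, 1), (0, 1)],
   [(1, 0), (1, -1), (0, -1), (-1, 0), (0, 1), (1, 1)]]

def pvDirections : PySem.Dict String Int :=
  PySem.Dict.ofList [("e", 0), ("ne", 1), ("nw", 2), ("w", 3), ("sw", 4), ("se", 5)]

-- none = KeyError on an unknown direction string (the table indexings are always in range)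
def pvOddrOffsetNeighbor (hex : Int × Int) (direction : String) : Option (Int × Int) :=
  let parity := PySem.Int.band hex.2 1
  (PySem.Dict.get? pvDirections direction).bind fun i =>
    (PySem.List.pyGet? pvOddrDirections parity).bind fun row =>
      (PySem.List.pyGet? row i).map fun dir => (hex.1 + dir.1, hex.2 + dir.2)

def pvGetCoordinates (steps : List String) (referenceTile : Int × Int) : Option (Int × Int) :=
  steps.foldl (fun acc step => acc.bind fun c => pvOddrOffsetNeighbor c step) (some referenceTile)

def day24P1 (stepList : List (List String)) : Int :=
  let tiles := stepList.foldl (fun (tiles : PySem.Dict (Int × Int) Bool) steps =>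
    match pvGetCoordinates steps (0, 0) with
    | none => tiles   -- Python raises KeyError here; excluded by Pre_day24P1
    | some pos =>
      match tiles.get? pos with
      | some b => tiles.insert pos (!b)
      | none => tiles.insert pos true) PySem.Dict.empty
  tiles.keys.foldl (fun sumBlack tile => if tiles.getD tile false then sumBlack + 1 else sumBlack) 0

-- ===== PORT B =====
def pvAxial : PySem.Dict String (Int × Int) :=
  PySem.Dict.ofList [("e", (1, 0)), ("ne", (1, -1)), ("nw", (0, -1)),
                     ("w", (-1, 0)), ("sw", (-1, 1)), ("se", (0, 1))]

-- none = KeyError on an unknown direction string; the inner 'for d in set(steps)'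
-- accumulates a sum, so its result does not depend on the set's iteration order
def pvPathEnd? (steps : List String) : Option (Int × Int) :=
  (PySem.Set.ofList steps).foldl
    (fun acc d => acc.bind fun p =>
      (PySem.Dict.get? pvAxial d).map fun v =>
        (p.1 + (PySem.List.count steps d : Int) * v.1,
         p.2 + (PySem.List.count steps d : Int) * v.2))
    (some (0, 0))

def day24P1_alt (stepList : List (List String)) : Int :=
  match stepList.foldl
      (fun acc steps => acc.bind fun eps => (pvPathEnd? steps).map (eps ++ [·]))
      (some []) with
  | none => 0   -- Python raises KeyError here; excluded by Pre_day24P1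
  | some endpoints =>
      ((PySem.Set.ofList endpoints).map
        (fun p => PySem.Int.mod ((PySem.List.count endpoints p : Int)) 2)).sum

-- ===== PRECONDITION & SPEC =====
-- Pre_ excludes exactly the inputs on which A raises KeyError: a step string
-- that is not one of the six direction names.
def Pre_day24P1 (stepList : List (List String)) : Prop :=
  ∀ steps ∈ stepList, ∀ s ∈ steps,
    s = "e" ∨ s = "ne" ∨ s = "nw" ∨ s = "w" ∨ s = "sw" ∨ s = "se"
instance (stepList : List (List String)) : Decidable (Pre_day24P1 stepList) := by
  unfold Pre_day24P1; infer_instance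

def pvWitness_day24P1 : List (List String) := [["e", "se", "w"], ["ne"], []]

def Spec_day24P1 (stepList : List (List String)) (out : Int) : Prop := out = day24P1_alt stepList
instance (stepList : List (List String)) (out : Int) : Decidable (Spec_day24P1 stepList out) := by
  unfold Spec_day24P1; infer_instance

-- ===== CLAIM (what is proved, stated in full; the proofs are below) =====
def Claim_equal_day24P1 : Prop := ∀ (stepList : List (List String)), Dom_day24P1 stepList → Pre_day24P1 stepList → Spec_day24P1 stepList (day24P1 stepList)

-- ===== LEMMAS AND PROOFS =====

def pvAxialDirs : List (String × (Int × Int)) :=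
  [("e", (1, 0)), ("ne", (1, -1)), ("nw", (0, -1)),
   ("w", (-1, 0)), ("sw", (-1, 1)), ("se", (0, 1))]

-- the endpoint of a path as the 6-term linear combination of its direction
-- counts (ghost function of the proof; B computes it over the distinct steps)
def pvEndpointB (steps : List String) : Int × Int :=
  ((pvAxialDirs.map (fun dv => ((PySem.List.count steps dv.1 : Int)) * dv.2.1)).sum,
   (pvAxialDirs.map (fun dv => ((PySem.List.count steps dv.1 : Int)) * dv.2.2)).sum)

-- axial step vector of a direction name (ghost function of the proof)
def pvVec (s : String) : Int × Int :=
  if s = "e" then (1, 0) else if s = "ne" then (1, -1) else if s = "nw" then (0, -1)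
  else if s = "w" then (-1, 0) else if s = "sw" then (-1, 1) else (0, 1)

-- axial -> odd-r offset coordinate conversion (ghost function of the proof)
def pvToOff (p : Int × Int) : Int × Int := (p.1 + (p.2 - p.2 % 2) / 2, p.2)

lemma pvToOff_inj {a b : Int × Int} (h : pvToOff a = pvToOff b) : a = b := by
  rcases a with ⟨q, r⟩; rcases b with ⟨q', r'⟩
  simp only [pvToOff, Prod.mk.injEq] at h ⊢
  omega

lemma pvStep_comm (s : String)
    (hs : s = "e" ∨ s = "ne" ∨ s = "nw" ∨ s = "w" ∨ s = "sw" ∨ s = "se")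
    (q r : Int) :
    pvOddrOffsetNeighbor (pvToOff (q, r)) s =
      some (pvToOff (q + (pvVec s).1, r + (pvVec s).2)) := by
  have hb : PySem.Int.band r 1 = r % 2 := by
    rw [PySem.Int.band_one, PySem.Int.mod_eq_emod_of_pos (by norm_num)]
  rcases hs with rfl | rfl | rfl | rfl | rfl | rfl <;>
  simp only [pvOddrOffsetNeighbor, pvToOff, hb] <;>
  [ rw [show pvVec "e" = (1, 0) from rfl, show PySem.Dict.get? pvDirections "e" = some 0 from rfl];
    rw [show pvVec "ne" = (1, -1) from rfl, show PySem.Dict.get? pvDirections "ne" = some 1 from rfl];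
    rw [show pvVec "nw" = (0, -1) from rfl, show PySem.Dict.get? pvDirections "nw" = some 2 from rfl];
    rw [show pvVec "w" = (-1, 0) from rfl, show PySem.Dict.get? pvDirections "w" = some 3 from rfl];
    rw [show pvVec "sw" = (-1, 1) from rfl, show PySem.Dict.get? pvDirections "sw" = some 4 from rfl];
    rw [show pvVec "se" = (0, 1) from rfl, show PySem.Dict.get? pvDirections "se" = some 5 from rfl]] <;>
  rcases Int.emod_two_eq r with hr | hr <;>
  rw [hr] <;>
  norm_num [pvOddrDirections, PySem.List.pyGet?, PySem.List.pyIdx?,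
    show Int.toNat 2 = 2 from rfl, show Int.toNat 3 = 3 from rfl,
    show Int.toNat 4 = 4 from rfl, show Int.toNat 5 = 5 from rfl,
    List.getElem_cons_succ, List.getElem_cons_zero] <;>
  omega

lemma pvEndB_nil : pvEndpointB [] = (0, 0) := by decide

lemma pvEndB_cons (s : String)
    (hs : s = "e" ∨ s = "ne" ∨ s = "nw" ∨ s = "w" ∨ s = "sw" ∨ s = "se")
    (rest : List String) :
    pvEndpointB (s :: rest) =
      ((pvVec s).1 + (pvEndpointB rest).1, (pvVec s).2 + (pvEndpointB rest).2) := by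
  rcases hs with rfl | rfl | rfl | rfl | rfl | rfl <;>
  [rw [show pvVec "e" = (1, 0) from rfl]; rw [show pvVec "ne" = (1, -1) from rfl];
   rw [show pvVec "nw" = (0, -1) from rfl]; rw [show pvVec "w" = (-1, 0) from rfl];
   rw [show pvVec "sw" = (-1, 1) from rfl]; rw [show pvVec "se" = (0, 1) from rfl]] <;>
  simp only [pvEndpointB, pvAxialDirs, PySem.List.count_eq, List.count_cons, List.map_cons,
    List.map_nil, List.sum_cons, List.sum_nil, Prod.mk.injEq] <;>
  norm_num <;> omega

lemma pvWalk_eq (steps : List String)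
    (h : ∀ s ∈ steps, s = "e" ∨ s = "ne" ∨ s = "nw" ∨ s = "w" ∨ s = "sw" ∨ s = "se") :
    ∀ p : Int × Int,
      steps.foldl (fun acc step => acc.bind fun c => pvOddrOffsetNeighbor c step)
          (some (pvToOff p)) =
        some (pvToOff (p.1 + (pvEndpointB steps).1, p.2 + (pvEndpointB steps).2)) := by
  induction steps with
  | nil => intro p; simp [pvEndB_nil]
  | cons s rest ih =>
    intro p
    have hs := h s (by simp)
    have hstep := pvStep_comm s hs p.1 p.2
    have := ih (fun x hx => h x (by simp [hx])) (p.1 + (pvVec s).1, p.2 + (pvVec s).2)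
    simp only [List.foldl, hstep, Option.bind_some] at *
    rw [this, pvEndB_cons s hs rest]
    congr 2 <;> ring_nf

lemma pvCoord_eq (steps : List String)
    (h : ∀ s ∈ steps, s = "e" ∨ s = "ne" ∨ s = "nw" ∨ s = "w" ∨ s = "sw" ∨ s = "se") :
    pvGetCoordinates steps (0, 0) = some (pvToOff (pvEndpointB steps)) := by
  have := pvWalk_eq steps h (0, 0)
  simpa [pvGetCoordinates, show pvToOff (0, 0) = (0, 0) from rfl] using this

-- per-direction contribution to a path's endpoint (ghost function of the proof)
def pvW (steps : List String) (d : String) : Int × Int :=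
  ((PySem.List.count steps d : Int) * (pvVec d).1,
   (PySem.List.count steps d : Int) * (pvVec d).2)

lemma pvAxial_get (d : String)
    (hd : d = "e" ∨ d = "ne" ∨ d = "nw" ∨ d = "w" ∨ d = "sw" ∨ d = "se") :
    PySem.Dict.get? pvAxial d = some (pvVec d) := by
  rcases hd with rfl | rfl | rfl | rfl | rfl | rfl <;> rfl

lemma pvFoldSet (steps : List String) (S : List String)
    (hv : ∀ d ∈ S, d = "e" ∨ d = "ne" ∨ d = "nw" ∨ d = "w" ∨ d = "sw" ∨ d = "se") :
    ∀ p : Int × Int,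
      S.foldl
        (fun acc d => acc.bind fun p =>
          (PySem.Dict.get? pvAxial d).map fun v =>
            (p.1 + (PySem.List.count steps d : Int) * v.1,
             p.2 + (PySem.List.count steps d : Int) * v.2))
        (some p) =
      some (p.1 + ((S.map (pvW steps)).sum).1, p.2 + ((S.map (pvW steps)).sum).2) := by
  induction S with
  | nil => intro p; simp
  | cons d S' ih =>
    intro p
    have hd := hv d (by simp)
    have := ih (fun x hx => hv x (by simp [hx]))
      (p.1 + (PySem.List.count steps d : Int) * (pvVec d).1,
       p.2 + (PySem.List.count steps d : Int) * (pvVec d).2)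
    simp only [List.foldl, pvAxial_get d hd, Option.bind_some, Option.map_some] at *
    rw [this]
    refine congrArg some ?_
    simp only [List.map_cons, List.sum_cons, Prod.fst_add, Prod.snd_add, pvW, Prod.mk.injEq]
    constructor <;> ring

lemma pvSum_distinct (steps : List String)
    (hv : ∀ s ∈ steps, s = "e" ∨ s = "ne" ∨ s = "nw" ∨ s = "w" ∨ s = "sw" ∨ s = "se") :
    ((PySem.Set.ofList steps).map (pvW steps)).sum = pvEndpointB steps := by
  have hnd : (PySem.Set.ofList steps).Nodup := PySem.Set.nodup_ofList _
  have hnd6 : (["e", "ne", "nw", "w", "sw", "se"] : List String).Nodup := by decide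
  have hd6 : ((["e", "ne", "nw", "w", "sw", "se"] : List String).map (pvW steps)).sum =
      pvEndpointB steps := by
    simp only [List.map_cons, List.map_nil, List.sum_cons, List.sum_nil, pvW, pvEndpointB,
      pvAxialDirs, Prod.ext_iff, Prod.fst_add, Prod.snd_add]
    rw [show pvVec "e" = (1, 0) from rfl, show pvVec "ne" = (1, -1) from rfl,
      show pvVec "nw" = (0, -1) from rfl, show pvVec "w" = (-1, 0) from rfl,
      show pvVec "sw" = (-1, 1) from rfl, show pvVec "se" = (0, 1) from rfl]
    norm_num
  rw [← hd6, ← List.sum_toFinset _ hnd, ← List.sum_toFinset _ hnd6]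
  apply Finset.sum_subset
  · intro x hx
    simp only [List.mem_toFinset] at hx ⊢
    have := (PySem.Set.mem_ofList _ _).mp hx
    rcases hv x this with rfl | rfl | rfl | rfl | rfl | rfl <;> simp
  · intro x _ hx
    simp only [List.mem_toFinset, PySem.Set.mem_ofList] at hx
    have hz : List.count x steps = 0 := List.count_eq_zero.mpr hx
    simp [pvW, PySem.List.count_eq, hz, Prod.ext_iff]

lemma pvPathEnd_eq (steps : List String)
    (hv : ∀ s ∈ steps, s = "e" ∨ s = "ne" ∨ s = "nw" ∨ s = "w" ∨ s = "sw" ∨ s = "se") :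
    pvPathEnd? steps = some (pvEndpointB steps) := by
  unfold pvPathEnd?
  rw [pvFoldSet steps _ (fun d hd => hv d ((PySem.Set.mem_ofList _ _).mp hd)) (0, 0),
    pvSum_distinct steps hv]
  simp

lemma pvMapEnd (L : List (List String)) (hPre : Pre_day24P1 L) :
    ∀ acc : List (Int × Int),
      L.foldl (fun acc steps => acc.bind fun eps => (pvPathEnd? steps).map (eps ++ [·]))
          (some acc) =
        some (acc ++ L.map pvEndpointB) := by
  induction L with
  | nil => intro acc; simp
  | cons steps rest ih =>
    intro acc
    simp only [List.foldl, pvPathEnd_eq steps (hPre steps (by simp)), Option.bind_some,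
      Option.map_some, List.map_cons]
    rw [ih (fun x hx s hs => hPre x (by simp [hx]) s hs)]
    simp

-- the toggle step of A, as a function of the tile position
def pvTgl (d : PySem.Dict (Int × Int) Bool) (x : Int × Int) : PySem.Dict (Int × Int) Bool :=
  match d.get? x with
  | some b => d.insert x (!b)
  | none => d.insert x true

-- invariant: A's toggle dict is the counter dict with values reduced mod 2
def pvRel (d1 : PySem.Dict (Int × Int) Bool) (d2 : PySem.Dict (Int × Int) Int) : Prop :=
  d1.items = d2.items.map (fun kv => (kv.1, decide (kv.2 % 2 = 1)))

lemma pvRel_keys {d1 : PySem.Dict (Int × Int) Bool} {d2 : PySem.Dict (Int × Int) Int}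
    (hrel : pvRel d1 d2) : d1.keys = d2.keys := by
  unfold pvRel at hrel
  simp only [PySem.Dict.keys, hrel, List.map_map]
  rfl

lemma pvRel_step (d1 : PySem.Dict (Int × Int) Bool) (d2 : PySem.Dict (Int × Int) Int)
    (hrel : pvRel d1 d2) (hnd : d2.keys.Nodup) (e : Int × Int) :
    pvRel (pvTgl d1 e) (d2.insert e (d2.getD e 0 + 1)) := by
  have hnd1 : d1.keys.Nodup := pvRel_keys hrel ▸ hnd
  unfold pvTgl
  cases h2 : d2.get? e with
  | none =>
    have hc2 : d2.contains e = false := by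
      rw [PySem.Dict.contains_eq_isSome_get?, h2]; rfl
    have hk2 : e ∉ d2.keys := (PySem.Dict.get?_eq_none_iff_not_mem_keys d2 e).mp h2
    have h1 : d1.get? e = none :=
      (PySem.Dict.get?_eq_none_iff_not_mem_keys d1 e).mpr (pvRel_keys hrel ▸ hk2)
    have hc1 : d1.contains e = false := by
      rw [PySem.Dict.contains_eq_isSome_get?, h1]; rfl
    rw [h1]
    unfold pvRel at hrel ⊢
    rw [PySem.Dict.items_insert_of_not_contains d1 _ hc1,
        PySem.Dict.items_insert_of_not_contains d2 _ hc2, List.map_append, hrel,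
        PySem.Dict.getD_of_get?_eq_none d2 _ h2]
    rfl
  | some v =>
    have hmem2 : (e, v) ∈ d2.items := PySem.Dict.mem_items_of_get?_eq_some d2 h2
    have hmem1 : (e, decide (v % 2 = 1)) ∈ d1.items := by
      rw [hrel]; exact List.mem_map.mpr ⟨(e, v), hmem2, rfl⟩
    have h1 : d1.get? e = some (decide (v % 2 = 1)) :=
      PySem.Dict.get?_of_mem_items d1 hmem1 hnd1
    have hc2 : d2.contains e = true := by
      rw [PySem.Dict.contains_eq_isSome_get?, h2]; rfl
    have hc1 : d1.contains e = true := by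
      rw [PySem.Dict.contains_eq_isSome_get?, h1]; rfl
    rw [h1]
    unfold pvRel at hrel ⊢
    rw [PySem.Dict.items_insert_of_contains d1 _ hc1,
        PySem.Dict.items_insert_of_contains d2 _ hc2, hrel,
        PySem.Dict.getD_of_get?_eq_some d2 _ h2, List.map_map, List.map_map]
    apply List.map_congr_left
    intro p _
    by_cases hp : p.1 = e
    · by_cases hq : v % 2 = 1 <;>
        simp [Function.comp, hp, hq, show ((v + 1) % 2 = 1) ↔ ¬(v % 2 = 1) from by omega]
    · simp [Function.comp, hp]

lemma pvLoop_rel (xs : List (Int × Int))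
    (d1 : PySem.Dict (Int × Int) Bool) (d2 : PySem.Dict (Int × Int) Int)
    (hrel : pvRel d1 d2) (hnd : d2.keys.Nodup) :
    pvRel (xs.foldl pvTgl d1)
      (xs.foldl (fun d x => d.insert x (d.getD x 0 + 1)) d2) := by
  induction xs generalizing d1 d2 with
  | nil => exact hrel
  | cons x rest ih =>
    exact ih _ _ (pvRel_step d1 d2 hrel hnd x) (PySem.Dict.nodup_keys_insert d2 x _ hnd)

lemma pvToggle_items (xs : List (Int × Int)) :
    (xs.foldl pvTgl PySem.Dict.empty).items =
      (PySem.Set.ofList xs).map (fun k => (k, decide ((xs.count k : Int) % 2 = 1))) := by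
  have h := pvLoop_rel xs PySem.Dict.empty PySem.Dict.empty rfl PySem.Dict.nodup_keys_empty
  unfold pvRel at h
  rw [PySem.Dict.foldl_insert_getD_add_one_eq_counter, PySem.Dict.items_counter] at h
  rw [h, List.map_map]
  rfl

-- building set(xs) commutes with an injective map of the elements
lemma pvAdd_map (s : List (Int × Int)) (x : Int × Int) :
    PySem.Set.add (s.map pvToOff) (pvToOff x) = (PySem.Set.add s x).map pvToOff := by
  simp only [PySem.Set.add, PySem.Set.contains]
  by_cases hx : x ∈ s
  · simp [hx, List.mem_map.mpr ⟨x, hx, rfl⟩]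
  · have : pvToOff x ∉ s.map pvToOff := by
      intro hmem
      obtain ⟨y, hy, hyx⟩ := List.mem_map.mp hmem
      exact hx (pvToOff_inj hyx ▸ hy)
    simp [hx, this]

lemma pvOfList_map (es : List (Int × Int)) :
    PySem.Set.ofList (es.map pvToOff) = (PySem.Set.ofList es).map pvToOff := by
  rw [PySem.Set.ofList_eq_foldl, PySem.Set.ofList_eq_foldl, List.foldl_map]
  suffices h : ∀ (acc : List (Int × Int)),
      es.foldl (fun s x => PySem.Set.add s (pvToOff x)) (acc.map pvToOff) =
        (es.foldl PySem.Set.add acc).map pvToOff by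
    simpa using h []
  induction es with
  | nil => intro acc; rfl
  | cons x rest ih => intro acc; simp only [List.foldl, pvAdd_map]; exact ih _

-- A's summing loop over a dict with the given items, as a sum over the keys
lemma pvSumA (d : PySem.Dict (Int × Int) Bool) (S : List (Int × Int))
    (f : (Int × Int) → Bool)
    (hitems : d.items = S.map (fun k => (k, f k))) (hS : S.Nodup) :
    d.keys.foldl (fun sumBlack tile => if d.getD tile false then sumBlack + 1 else sumBlack) 0 =
      (S.map (fun k => if f k then (1 : Int) else 0)).sum := by
  have hk : d.keys = S := by
    simp [PySem.Dict.keys, hitems, List.map_map, Function.comp_def]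
  have hget : ∀ k ∈ S, d.getD k false = f k := by
    intro k hkS
    have hnd : d.keys.Nodup := hk ▸ hS
    have hmem : (k, f k) ∈ d.items := by
      rw [hitems]; exact List.mem_map.mpr ⟨k, hkS, rfl⟩
    have := PySem.Dict.get?_of_mem_items d hmem hnd
    exact PySem.Dict.getD_of_get?_eq_some d _ this
  rw [hk]
  rw [show (S.foldl (fun sumBlack tile => if d.getD tile false then sumBlack + 1 else sumBlack)
        (0 : Int)) =
      S.foldl (fun (s : Int) k => s + (if f k then 1 else 0)) 0 from
    PySem.List.foldl_congr_mem _ _ _ _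
      (by intro acc x hx; rw [hget x hx]; split_ifs <;> simp)]
  rw [PySem.List.foldl_add]
  simp

-- ===== VERDICT (by name: the statement is the Claim_ definition above) =====
theorem day24P1_spec : Claim_equal_day24P1 := by
  intro L _ hPre
  unfold Spec_day24P1
  show day24P1 L = day24P1_alt L
  simp only [day24P1, day24P1_alt]
  rw [show (L.foldl
        (fun acc steps => acc.bind fun eps => (pvPathEnd? steps).map (eps ++ [·]))
        (some [])) = some (L.map pvEndpointB) from by simpa using pvMapEnd L hPre []]
  -- rewrite A's main loop as a toggle fold over the list of offset endpoints
  rw [show (L.foldl (fun (tiles : PySem.Dict (Int × Int) Bool) steps =>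
        match pvGetCoordinates steps (0, 0) with
        | none => tiles
        | some pos =>
          match tiles.get? pos with
          | some b => tiles.insert pos (!b)
          | none => tiles.insert pos true) PySem.Dict.empty) =
      L.foldl (fun tiles steps => pvTgl tiles (pvToOff (pvEndpointB steps))) PySem.Dict.empty from
    PySem.List.foldl_congr_mem _ _ _ _
      (by intro acc steps hsteps
          rw [pvCoord_eq steps (hPre steps hsteps)]
          rfl)]
  rw [show (L.foldl (fun tiles steps => pvTgl tiles (pvToOff (pvEndpointB steps)))
        PySem.Dict.empty) =
      ((L.map pvEndpointB).map pvToOff).foldl pvTgl PySem.Dict.empty from by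
    rw [List.foldl_map, List.foldl_map]]
  set es := L.map pvEndpointB with hes
  rw [pvSumA _ (PySem.Set.ofList (es.map pvToOff))
      (fun k => decide (((es.map pvToOff).count k : Int) % 2 = 1))
      (pvToggle_items _) (PySem.Set.nodup_ofList _)]
  -- transport the sum along the injective conversion pvToOff
  rw [show PySem.Set.ofList (es.map pvToOff) = (PySem.Set.ofList es).map pvToOff from
    pvOfList_map es]
  rw [List.map_map]
  apply congrArg
  apply List.map_congr_left
  intro p hp
  have hcount : (es.map pvToOff).count (pvToOff p) = es.count p :=
    List.count_map_of_injective es pvToOff (fun _ _ h => pvToOff_inj h) p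
  have hm : PySem.Int.mod ((PySem.List.count es p : Int)) 2 = (es.count p : Int) % 2 := by
    rw [PySem.Int.mod_eq_emod_of_pos (by norm_num), PySem.List.count_eq]
  simp only [Function.comp, hcount, hm]
  rcases Nat.mod_two_eq_zero_or_one (es.count p) with h | h
  · have : ((es.count p : Int)) % 2 = 0 := by omega
    simp [this]
  · have : ((es.count p : Int)) % 2 = 1 := by omega
    simp [this]
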